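-- pv_equiv track=rewrite | github.com/AudunWA/master-thesis-code | prediction_pipeline/train_driving_net_debug_spurv.py | get_episode_sequences
-- ===== SOURCE A (Python) =====
-- def get_episode_sequences(data, sampling_interval, seq_length):
--     sequences = []
--     slices = []
--     for o in range(sampling_interval + 1):
--         slices.append(data[o::sampling_interval + 1])
--     for s in slices:
--         for o in range(0, len(s)):
--             if o + seq_length <= len(s):
--                 sequences.append(s[o:o + seq_length])
--     return sequences
-- ===== SOURCE B (Python) =====
-- def get_episode_sequences(data, sampling_interval, seq_length):
--     if seq_length <= 0:
--         return []
--     step = sampling_interval + 1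
--     sequences = []
--     for o in range(step):
--         n = (len(data) - o + step - 1) // step  # length of the strided subsequence starting at o
--         for i in range(n - seq_length + 1):
--             sequences.append([data[o + (i + j) * step] for j in range(seq_length)])
--     return sequences
-- ===== Notes on version B (the rewrite author's own statement) =====
-- stated objective: alternative
-- what changed: B never materializes the intermediate strided-slices list: it computes each strided subsequence length by a closed-form ceiling division and emits each window directly by index arithmetic into the original data, with the window count as the loop bound instead of a per-position guard.
-- intended difference: For seq_length <= 0 with sampling_interval >= 0 and non-empty data, A returns Python's accidental negative-stop slices s[o:o+seq_length] (one per element: empty lists for seq_length == 0, odd tail fragments for negative seq_length), while B validates the window length and returns [], the natural value when no positive-length window is requested. — e.g. on get_episode_sequences([1], 0, 0): A returns [[]], B returns []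
import Mathlib
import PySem

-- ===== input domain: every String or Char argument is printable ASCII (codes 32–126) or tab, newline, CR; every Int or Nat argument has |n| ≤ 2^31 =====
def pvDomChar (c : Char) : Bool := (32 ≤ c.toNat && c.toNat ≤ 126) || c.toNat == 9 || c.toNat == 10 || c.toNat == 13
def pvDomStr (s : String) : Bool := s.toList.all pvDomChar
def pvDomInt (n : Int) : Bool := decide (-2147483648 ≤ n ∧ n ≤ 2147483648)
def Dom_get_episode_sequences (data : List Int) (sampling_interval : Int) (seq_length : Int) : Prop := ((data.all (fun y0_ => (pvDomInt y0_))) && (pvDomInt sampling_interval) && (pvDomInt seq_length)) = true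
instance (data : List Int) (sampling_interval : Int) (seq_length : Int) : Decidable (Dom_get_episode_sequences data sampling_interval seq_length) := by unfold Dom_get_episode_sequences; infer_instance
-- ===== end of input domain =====

-- B builds each window by direct index arithmetic into `data` (window count from a closed-form
-- ceiling division) instead of materializing the intermediate list of strided slices; objective:
-- alternative decomposition, same asymptotic cost.

-- ===== PORT A =====
def get_episode_sequences (data : List Int) (sampling_interval : Int) (seq_length : Int) : List (List Int) :=
  -- sequences = []; slices = []
  -- for o in range(sampling_interval + 1): slices.append(data[o::sampling_interval + 1])
  --   (slice? is none only for step = 0; the loop bound makes the step ≥ 1 here, so getD [] never fires)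
  let slices : List (List Int) :=
    (PySem.List.pyRange 0 (sampling_interval + 1) 1).foldl
      (fun acc o => acc ++ [(PySem.List.slice? data (some o) none (sampling_interval + 1)).getD []]) []
  -- for s in slices: for o in range(0, len(s)): if o + seq_length <= len(s): sequences.append(s[o:o+seq_length])
  slices.foldl
    (fun seqs s =>
      (PySem.List.pyRange 0 (s.length : Int) 1).foldl
        (fun seqs o =>
          if o + seq_length ≤ (s.length : Int) then
            seqs ++ [PySem.List.slice s (some o) (some (o + seq_length))]
          else seqs)
        seqs)
    []

-- ===== PORT B =====
def get_episode_sequences_alt (data : List Int) (sampling_interval : Int) (seq_length : Int) : List (List Int) :=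
  -- if seq_length <= 0: return []
  -- step = sampling_interval + 1
  -- for o in range(step):
  --   n = (len(data) - o + step - 1) // step
  --   for i in range(n - seq_length + 1):
  --     sequences.append([data[o + (i + j) * step] for j in range(seq_length)])
  --   (data[...] is always in range in Source B, so pyGetD's default is never used)
  if seq_length ≤ 0 then [] else
  let step := sampling_interval + 1
  (PySem.List.pyRange 0 step 1).foldl
    (fun seqs o =>
      let n := PySem.Int.floordiv ((data.length : Int) - o + step - 1) step
      (PySem.List.pyRange 0 (n - seq_length + 1) 1).foldl
        (fun seqs i =>
          seqs ++ [(PySem.List.pyRange 0 seq_length 1).map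
            (fun j => PySem.List.pyGetD data (o + (i + j) * step) 0)])
        seqs)
    []

-- ===== PRECONDITION & SPEC =====
-- For seq_length ≤ 0 with sampling_interval ≥ 0 and non-empty data, A returns Python's accidental
-- negative-stop slices s[o:o+seq_length] (one per element: empty lists for seq_length == 0, odd tail
-- fragments for negative seq_length), while B validates the window length and returns [], the
-- natural value when no positive-length window is requested.
def D_get_episode_sequences (data : List Int) (sampling_interval : Int) (seq_length : Int) : Prop :=
  0 ≤ sampling_interval ∧ seq_length ≤ 0 ∧ data ≠ []
instance (data : List Int) (sampling_interval : Int) (seq_length : Int) : Decidable (D_get_episode_sequences data sampling_interval seq_length) := by unfold D_get_episode_sequences; infer_instance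

def Spec_get_episode_sequences (data : List Int) (sampling_interval : Int) (seq_length : Int) (out : List (List Int)) : Prop := ¬ D_get_episode_sequences data sampling_interval seq_length → out = get_episode_sequences_alt data sampling_interval seq_length
instance (data : List Int) (sampling_interval : Int) (seq_length : Int) (out : List (List Int)) : Decidable (Spec_get_episode_sequences data sampling_interval seq_length out) := by unfold Spec_get_episode_sequences; infer_instance

def pvDiffWitness_get_episode_sequences : List Int × Int × Int := ([1], 0, 0)
def pvDiffWitnessOut_get_episode_sequences : (List (List Int)) × (List (List Int)) := ([[]], [])

-- ===== CLAIM (what is proved, stated in full; the proofs are below) =====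
def Claim_unchanged_get_episode_sequences : Prop := ∀ (data : List Int) (sampling_interval : Int) (seq_length : Int), Dom_get_episode_sequences data sampling_interval seq_length → Spec_get_episode_sequences data sampling_interval seq_length (get_episode_sequences data sampling_interval seq_length)
def Claim_changed_get_episode_sequences : Prop := Dom_get_episode_sequences (pvDiffWitness_get_episode_sequences.1) (pvDiffWitness_get_episode_sequences.2.1) (pvDiffWitness_get_episode_sequences.2.2) ∧ D_get_episode_sequences (pvDiffWitness_get_episode_sequences.1) (pvDiffWitness_get_episode_sequences.2.1) (pvDiffWitness_get_episode_sequences.2.2) ∧ get_episode_sequences (pvDiffWitness_get_episode_sequences.1) (pvDiffWitness_get_episode_sequences.2.1) (pvDiffWitness_get_episode_sequences.2.2) = pvDiffWitnessOut_get_episode_sequences.1 ∧ get_episode_sequences_alt (pvDiffWitness_get_episode_sequences.1) (pvDiffWitness_get_episode_sequences.2.1) (pvDiffWitness_get_episode_sequences.2.2) = pvDiffWitnessOut_get_episode_sequences.2 ∧ pvDiffWitnessOut_get_episode_sequences.1 ≠ pvDiffWitnessOut_get_episode_sequences.2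

-- ===== LEMMAS AND PROOFS =====

-- cutting an increasing unit range below c is truncating the range at c
lemma pv_filter_pyRange_lt (c : Int) : ∀ (a b : Int), c ≤ b →
    (PySem.List.pyRange a b 1).filter (fun x => decide (x < c)) = PySem.List.pyRange a c 1 := by
  intro a b hcb
  by_cases hab : b ≤ a
  · rw [PySem.List.pyRange_one_eq_nil hab, PySem.List.pyRange_one_eq_nil (le_trans hcb hab)]
    rfl
  have h : ∀ (m : Nat) (a : Int), b - a = m → c ≤ b →
      (PySem.List.pyRange a b 1).filter (fun x => decide (x < c)) = PySem.List.pyRange a c 1 := by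
    intro m
    induction m with
    | zero =>
      intro a h1 h2
      rw [PySem.List.pyRange_one_eq_nil (by omega), PySem.List.pyRange_one_eq_nil (by omega)]
      rfl
    | succ k ih =>
      intro a h1 h2
      rw [PySem.List.pyRange_one_cons (by omega)]
      by_cases hac : a < c
      · rw [List.filter_cons_of_pos (by simpa), PySem.List.pyRange_one_cons hac,
          ih (a + 1) (by omega) h2]
      · rw [List.filter_cons_of_neg (by simp; omega), ih (a + 1) (by omega) h2,
          PySem.List.pyRange_one_eq_nil (show c ≤ a + 1 by omega),
          PySem.List.pyRange_one_eq_nil (show c ≤ a by omega)]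
  exact h (b - a).toNat a (by omega) hcb

-- what data[o::st] is, as a map over a range (0 ≤ o, 0 < st)
lemma pv_strided_slice_eq (data : List Int) (o st : Nat) (hst : 0 < st) :
    (PySem.List.slice? data (some (o : Int)) none (st : Int)).getD []
      = (List.range ((data.length - o + st - 1) / st)).map (fun k => data.getD (o + st * k) 0) := by
  unfold PySem.List.slice? PySem.List.sliceIndices
  have hstz : ¬((st : Int) = 0) := by exact_mod_cast hst.ne'
  have hstneg : ¬((st : Int) < 0) := by omega
  have hopos : ¬((o : Int) < 0) := by omega
  have hstpos : (0 : Int) < st := by exact_mod_cast hst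
  simp only [hstz, hstneg, hopos, if_false, Option.getD_some, if_pos hstpos]
  rcases Nat.lt_or_ge o data.length with hoL | hLo
  · have hmin : min (o : Int) (data.length : Int) = o := by omega
    rw [hmin, if_pos (by omega)]
    have hcast : ((data.length : Int) - o + st - 1) = ((data.length - o + st - 1 : Nat) : Int) := by
      omega
    have hcount : (((data.length : Int) - o + st - 1) / st).toNat = (data.length - o + st - 1) / st := by
      rw [hcast, ← Int.natCast_ediv]
      exact Int.toNat_natCast _
    rw [hcount]
    set c := (data.length - o + st - 1) / st with hc
    have hmul : c * st ≤ data.length - o + st - 1 := Nat.div_mul_le_self _ _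
    rw [← List.filterMap_eq_map]
    apply List.filterMap_congr
    intro x hx
    rw [List.mem_range] at hx
    have hxm : (x + 1) * st ≤ c * st := Nat.mul_le_mul_right st hx
    have hexp : (x + 1) * st = x * st + st := by ring
    have hcomm : st * x = x * st := Nat.mul_comm st x
    have hidx : o + st * x < data.length := by omega
    have htn : (((o : Int) + st * x)).toNat = o + st * x := by omega
    simp only [htn, Function.comp_apply]
    rw [List.getElem?_eq_getElem hidx, List.getD_eq_getElem _ _ hidx]
  · have hmin : min (o : Int) (data.length : Int) = data.length := by omega
    rw [hmin, if_neg (by omega), Nat.div_eq_of_lt (by omega)]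
    simp

-- A's inner window loop over a slice s, as an appended map
lemma pv_windows_A (s : List Int) (seq : Int) (hseq : 1 ≤ seq) (acc : List (List Int)) :
    (PySem.List.pyRange 0 (s.length : Int) 1).foldl
      (fun seqs o => if o + seq ≤ (s.length : Int) then
          seqs ++ [PySem.List.slice s (some o) (some (o + seq))] else seqs) acc
    = acc ++ (PySem.List.pyRange 0 ((s.length : Int) - seq + 1) 1).map
        (fun o => PySem.List.slice s (some o) (some (o + seq))) := by
  have hbody : (fun (seqs : List (List Int)) (o : Int) => if o + seq ≤ (s.length : Int) then
          seqs ++ [PySem.List.slice s (some o) (some (o + seq))] else seqs)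
      = (fun seqs o => if (fun x => decide (x + seq ≤ (s.length : Int))) o = true then
          seqs ++ [(fun o => PySem.List.slice s (some o) (some (o + seq))) o] else seqs) := by
    funext seqs o; simp
  rw [hbody, PySem.List.foldl_append_if]
  congr 1
  have hfc : (PySem.List.pyRange 0 (s.length : Int) 1).filter
        (fun x => decide (x + seq ≤ (s.length : Int)))
      = (PySem.List.pyRange 0 (s.length : Int) 1).filter
        (fun x => decide (x < (s.length : Int) - seq + 1)) := by
    apply List.filter_congr
    intro x _
    exact decide_eq_decide.mpr (by omega)
  rw [hfc, pv_filter_pyRange_lt _ _ _ (by omega)]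

-- per-offset: A's windows over the strided slice = B's directly indexed windows
lemma pv_offset (data : List Int) (oN stN : Nat) (hst : 0 < stN) (ho : oN < stN) (seq : Int) (hseq : 1 ≤ seq) :
    (PySem.List.pyRange 0 ((((PySem.List.slice? data (some (oN : Int)) none (stN : Int)).getD []).length : Int) - seq + 1) 1).map
      (fun o2 => PySem.List.slice ((PySem.List.slice? data (some (oN : Int)) none (stN : Int)).getD []) (some o2) (some (o2 + seq)))
    = (PySem.List.pyRange 0 (PySem.Int.floordiv ((data.length : Int) - oN + stN - 1) stN - seq + 1) 1).map
      (fun i => (PySem.List.pyRange 0 seq 1).map (fun j => PySem.List.pyGetD data ((oN : Int) + (i + j) * stN) 0)) := by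
  rw [pv_strided_slice_eq data oN stN hst]
  set c := (data.length - oN + stN - 1) / stN with hc
  have hn : PySem.Int.floordiv ((data.length : Int) - oN + stN - 1) stN = (c : Int) := by
    rw [PySem.Int.floordiv_eq_ediv_of_pos (by exact_mod_cast hst)]
    rcases Nat.lt_or_ge oN data.length with h | h
    · rw [show ((data.length : Int) - oN + stN - 1) = ((data.length - oN + stN - 1 : Nat) : Int) by omega,
        ← Int.natCast_ediv]
    · have hc0 : c = 0 := by
        rw [hc]; exact Nat.div_eq_of_lt (by omega)
      rw [hc0]
      exact Int.ediv_eq_zero_of_lt (by omega) (by omega)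
  rw [hn]
  simp only [List.length_map, List.length_range]
  apply List.map_congr_left
  intro i hi
  rw [PySem.List.mem_pyRange_one] at hi
  have hi' : i = (i.toNat : Nat) := by omega
  have hs' : seq = (seq.toNat : Nat) := by omega
  set iN := i.toNat
  set q := seq.toNat
  have hiq : iN + q ≤ c := by omega
  rw [hi', hs', PySem.List.slice_natCast_add]
  apply List.ext_getElem
  · simp [PySem.List.length_pyRange_one]
    omega
  · intro j h1 h2
    simp only [List.getElem_take, List.getElem_drop, List.getElem_map, List.getElem_range,
      PySem.List.getElem_pyRange_one]
    rw [show ((oN : Int) + ((iN : Int) + (0 + (j : Int))) * (stN : Int)) = ((oN + (iN + j) * stN : Nat) : Int) by push_cast; ring,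
      PySem.List.pyGetD_natCast]
    congr 1
    ring

theorem get_episode_sequences_spec : Claim_unchanged_get_episode_sequences := by
  intro data si seq _ hnD
  unfold D_get_episode_sequences at hnD
  unfold get_episode_sequences get_episode_sequences_alt
  by_cases hsi : si < 0
  · simp [PySem.List.pyRange_one_eq_nil (show si + 1 ≤ 0 by omega)]
  · by_cases hseq0 : seq ≤ 0
    · -- outside D_ with si ≥ 0 and seq ≤ 0, the data must be empty; both sides are []
      have hdata : data = [] := by
        by_contra h
        exact hnD ⟨by omega, hseq0, h⟩
      subst hdata
      rw [if_pos hseq0]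
      have hS : ∀ o ∈ PySem.List.pyRange 0 (si + 1) 1,
          (PySem.List.slice? ([] : List Int) (some o) none (si + 1)).getD [] = ([] : List Int) := by
        intro o ho
        rw [PySem.List.mem_pyRange_one] at ho
        rw [show o = ((o.toNat : Nat) : Int) by omega,
          show si + 1 = (((si + 1).toNat : Nat) : Int) by omega,
          pv_strided_slice_eq [] o.toNat (si + 1).toNat (by omega)]
        simp only [List.length_nil]
        rw [Nat.div_eq_of_lt (by omega)]
        simp
      simp only [PySem.List.foldl_append_singleton_eq_map, List.nil_append]
      rw [List.map_congr_left hS]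
      simp only [List.foldl_map, List.length_nil, Nat.cast_zero,
        PySem.List.pyRange_one_eq_nil (le_refl (0 : Int)), List.foldl_nil]
      exact List.foldl_fixed _
    · have hseq : 1 ≤ seq := by omega
      rw [if_neg hseq0]
      have hA := fun (s : List Int) (acc : List (List Int)) => pv_windows_A s seq hseq acc
      simp only [PySem.List.foldl_append_singleton_eq_map, List.nil_append, hA,
        PySem.List.foldl_append_eq_flatMap, List.flatMap_map]
      apply List.flatMap_congr
      intro o ho
      rw [PySem.List.mem_pyRange_one] at ho
      have ho' : o = (o.toNat : Nat) := by omega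
      have hst' : si + 1 = ((si + 1).toNat : Nat) := by omega
      rw [ho', hst']
      exact pv_offset data o.toNat (si + 1).toNat (by omega) (by omega) seq hseq

theorem get_episode_sequences_changed : Claim_changed_get_episode_sequences := by
  unfold Claim_changed_get_episode_sequences; decide
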